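-- pv_equiv track=rewrite | github.com/Superomego-cloud/philoforces | main.py | ret_time
-- ===== SOURCE A (Python) =====
-- def ret_time(i):
--
--     s = i
--     p = 0
--
--     while(s // 60):
--         p += 1
--         s = s // 60
--
--     arr = []
--     if(p > 2): arr.append(i%(60**3))
--     p = min(p, 2)
--
--     for w in range(p, -1, -1):
--         if not w: arr.append(i%60)
--         else: arr.append((i % 60**(w+1))//(60**w))
--
--     return arr
-- ===== SOURCE B (Python) =====
-- def ret_time(i):
--     # Peel base-60 digits least-significant first, then assemble by indexing.
--     t = i
--     digits = []
--     while True: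
--         digits.append(t % 60)
--         t //= 60
--         if t == 0:
--             break
--     if len(digits) - 1 > 2:
--         return [i % 216000, digits[2], digits[1], digits[0]]
--     return digits[::-1]
-- ===== Notes on version B (the rewrite author's own statement) =====
-- stated objective: alternative
-- what changed: Replaces A's two-phase count-the-magnitude-then-reconstruct-each-component-with-powers-of-60 structure by a single remainder-peeling loop that collects base-60 digits least-significant first and assembles the result by list indexing/reversal.
import Mathlib
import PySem

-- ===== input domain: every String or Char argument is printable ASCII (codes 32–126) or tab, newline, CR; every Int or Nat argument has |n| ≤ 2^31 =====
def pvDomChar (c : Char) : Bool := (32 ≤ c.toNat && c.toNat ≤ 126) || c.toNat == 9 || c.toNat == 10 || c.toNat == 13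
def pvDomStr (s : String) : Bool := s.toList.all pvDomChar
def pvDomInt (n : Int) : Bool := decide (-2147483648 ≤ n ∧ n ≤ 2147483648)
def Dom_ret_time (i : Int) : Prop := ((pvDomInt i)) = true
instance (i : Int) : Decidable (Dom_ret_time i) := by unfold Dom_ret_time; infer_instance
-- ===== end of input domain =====

-- B rebuilds the result by peeling base-60 digits in one remainder loop instead of
-- A's count-then-reconstruct-with-powers structure (objective: alternative decomposition).
-- Both Pythons infinite-loop on negative i; Pre_ excludes i < 0.

-- ===== PORT A =====
-- A's while loop: count how many times s can be floor-divided by 60 before the quotient is 0.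
-- The '0 < s' guard only makes the recursion total; it never fires on Pre_ (0 ≤ i).
def loopA (s : Int) (p : Nat) : Nat :=
  if PySem.Int.floordiv s 60 ≠ 0 ∧ 0 < s then loopA (PySem.Int.floordiv s 60) (p + 1) else p
termination_by s.toNat
decreasing_by
  rename_i h
  simp only [PySem.Int.floordiv_eq_ediv_of_pos (by norm_num : (0:Int) < 60)] at *
  omega

def ret_time (i : Int) : List Int :=
  let p := loopA i 0
  let arr : List Int := if 2 < p then [PySem.Int.mod i (60 ^ 3)] else []
  let p2 := min p 2
  (PySem.List.pyRange (p2 : Int) (-1) (-1)).foldl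
    (fun acc w =>
      if w = 0 then acc ++ [PySem.Int.mod i 60]
      else acc ++ [PySem.Int.floordiv (PySem.Int.mod i ((60:Int) ^ (w + 1).toNat)) ((60:Int) ^ w.toNat)])
    arr

-- ===== PORT B =====
-- B's digit-peeling loop; continues while the quotient is positive ('0 < t'' also guards
-- totality on negatives, where the Python loops forever — excluded by Pre_).
def peel (t : Int) : List Int :=
  if 0 < PySem.Int.floordiv t 60 then
    PySem.Int.mod t 60 :: peel (PySem.Int.floordiv t 60)
  else [PySem.Int.mod t 60]
termination_by t.toNat
decreasing_by
  rename_i h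
  simp only [PySem.Int.floordiv_eq_ediv_of_pos (by norm_num : (0:Int) < 60)] at *
  omega

def ret_time_alt (i : Int) : List Int :=
  let ds := peel i
  if (ds.length : Int) - 1 > 2 then
    [PySem.Int.mod i 216000, ds.getD 2 0, ds.getD 1 0, ds.getD 0 0]
  else ds.reverse

-- ===== PRECONDITION & SPEC =====
-- Pre_ excludes negative i, on which both Pythons loop forever (s // 60 is -1 forever).
def Pre_ret_time (i : Int) : Prop := 0 ≤ i
instance (i : Int) : Decidable (Pre_ret_time i) := by unfold Pre_ret_time; infer_instance
def pvWitness_ret_time : Int := (3725)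

def Spec_ret_time (i : Int) (out : List Int) : Prop := out = ret_time_alt i
instance (i : Int) (out : List Int) : Decidable (Spec_ret_time i out) := by unfold Spec_ret_time; infer_instance

-- ===== CLAIM (what is proved, stated in full; the proofs are below) =====
def Claim_equal_ret_time : Prop := ∀ (i : Int), Dom_ret_time i → Pre_ret_time i → Spec_ret_time i (ret_time i)

-- ===== LEMMAS AND PROOFS =====

lemma fd_eq (a : Int) : PySem.Int.floordiv a 60 = a / 60 :=
  PySem.Int.floordiv_eq_ediv_of_pos (by norm_num)

lemma loopA_step (s : Int) (p : Nat) (h1 : s / 60 ≠ 0) (h2 : 0 < s) :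
    loopA s p = loopA (s / 60) (p + 1) := by
  rw [loopA, fd_eq]; simp [h1, h2]

lemma loopA_stop (s : Int) (p : Nat) (h : s / 60 = 0) :
    loopA s p = p := by
  rw [loopA, fd_eq]; simp [h]

lemma loopA_ge (s : Int) (p : Nat) : p ≤ loopA s p := by
  fun_induction loopA s p with
  | case1 s p h ih => omega
  | case2 s p h => omega

lemma peel_step (t : Int) (h : 0 < t / 60) :
    peel t = PySem.Int.mod t 60 :: peel (t / 60) := by
  rw [peel, fd_eq]; simp [h]

lemma peel_stop (t : Int) (h : ¬ 0 < t / 60) :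
    peel t = [PySem.Int.mod t 60] := by
  rw [peel, fd_eq]; simp [h]

lemma peel_length_pos (t : Int) : 0 < (peel t).length := by
  rw [peel]; split <;> simp

theorem ret_time_spec : Claim_equal_ret_time := by
  intro i _ hpre
  unfold Spec_ret_time ret_time ret_time_alt
  have hpre' : (0:Int) ≤ i := hpre
  have hr0 : PySem.List.pyRange 0 (-1) (-1) = [0] := by decide
  have hr1 : PySem.List.pyRange 1 (-1) (-1) = [1, 0] := by decide
  have hr2 : PySem.List.pyRange 2 (-1) (-1) = [2, 1, 0] := by decide
  by_cases h1 : i < 60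
  · -- one digit
    have hA : loopA i 0 = 0 := loopA_stop i 0 (by omega)
    have hB : peel i = [PySem.Int.mod i 60] := peel_stop i (by omega)
    simp [hA, hB, hr0]
  · by_cases h2 : i < 3600
    · -- two digits
      have hA : loopA i 0 = 1 := by
        rw [loopA_step i 0 (by omega) (by omega), loopA_stop _ 1 (by omega)]
      have hB : peel i = [PySem.Int.mod i 60, PySem.Int.mod (i / 60) 60] := by
        rw [peel_step i (by omega), peel_stop (i / 60) (by omega)]
      simp [hA, hB, hr1]
      omega
    · by_cases h3 : i < 216000
      · -- three digits
        have hA : loopA i 0 = 2 := by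
          rw [loopA_step i 0 (by omega) (by omega), loopA_step _ 1 (by omega) (by omega),
            loopA_stop _ 2 (by omega)]
        have hB : peel i = [PySem.Int.mod i 60, PySem.Int.mod (i / 60) 60,
            PySem.Int.mod (i / 60 / 60) 60] := by
          rw [peel_step i (by omega), peel_step (i / 60) (by omega),
            peel_stop (i / 60 / 60) (by omega)]
        simp [hA, hB, hr2]
        constructor <;> omega
      · -- four or more base-60 digits: A caps at 2, B indexes digits[2],[1],[0]
        have hA : 2 < loopA i 0 := by
          rw [loopA_step i 0 (by omega) (by omega), loopA_step _ 1 (by omega) (by omega),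
            loopA_step _ 2 (by omega) (by omega)]
          have := loopA_ge (i / 60 / 60 / 60) (2 + 1)
          omega
        have hmin : min (loopA i 0) 2 = 2 := by omega
        have hB : peel i = PySem.Int.mod i 60 :: PySem.Int.mod (i / 60) 60 ::
            PySem.Int.mod (i / 60 / 60) 60 :: peel (i / 60 / 60 / 60) := by
          rw [peel_step i (by omega), peel_step (i / 60) (by omega),
            peel_step (i / 60 / 60) (by omega)]
        have hlen := peel_length_pos (i / 60 / 60 / 60)
        simp [hA, hmin, hB, hr2]
        rw [if_pos (by omega)]
        have e1 : i % 216000 / 3600 = i / 60 / 60 % 60 := by omega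
        have e2 : i % 3600 / 60 = i / 60 % 60 := by omega
        rw [e1, e2]
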